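-- pv_equiv track=rewrite | github.com/IlyaLab/BNMPy | src/BNMPy/KGBN.py | update_model_without_flip_onestep_withPerterbation
-- ===== SOURCE A (Python) =====
-- def node_update_rules(init_cur_upstream_values, init_cur_operation):
--     '''
--     Example input:
--     init_cur_upstream_values = [True,False,False,True]
--     init_cur_operation = ["activate","activate","activate",'inactivate']
--     '''
--     # get the index of the operation where the operation is activate
--     active_index = [i for i, x in enumerate(init_cur_operation) if x == "activate"]
--     inactive_index = [i for i, x in enumerate(init_cur_operation) if x == "inactivate"]
--
--
--     if len(active_index) > 0:
--         cur1 = False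
--         for index in active_index:
--             cur1 = cur1 or init_cur_upstream_values[index]
--     else:
--         cur1 = False
--
--     if len(inactive_index) > 0:
--         cur2 = False
--         for index in inactive_index:
--             cur2 = cur2 or init_cur_upstream_values[index]
--     else:
--         cur2 = False
--
--     result = cur1 and (not cur2)
--     return result
--
-- def update_model_without_flip_onestep_withPerterbation(model_t0,dic_nodes_incoming, onlist = [], offlist = []):
--     model_t1 = model_t0.copy()
--
--     for cur_node in list(model_t0.keys()):
--         if cur_node in onlist:
--             cur_node_value = True
--             model_t1[cur_node] = cur_node_value
--
--         elif cur_node in offlist: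
--             cur_node_value = False
--             model_t1[cur_node] = cur_node_value
--
--         elif cur_node in list(dic_nodes_incoming.keys()):
--             updstream_nodes =list(dic_nodes_incoming[cur_node].keys())
--             init_cur_upstream_values = []
--             init_cur_operation = []
--
--             for upstream_node in updstream_nodes:
--                 init_cur_upstream_values.append(model_t0[upstream_node])
--                 init_cur_operation.append(dic_nodes_incoming[cur_node][upstream_node])
--
--             cur_node_value = node_update_rules(init_cur_upstream_values,init_cur_operation)
--             model_t1[cur_node] = cur_node_value
--
--         else:
--             model_t1[cur_node] = model_t0[cur_node]
--
--     return(model_t1)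
-- ===== SOURCE B (Python) =====
-- def update_model_without_flip_onestep_withPerterbation(model_t0, dic_nodes_incoming, onlist=[], offlist=[]):
--     model_t1 = model_t0.copy()
--     # one pass over the incoming-edge dict for nodes not perturbed
--     for node, ops in dic_nodes_incoming.items():
--         if node in model_t1 and node not in onlist and node not in offlist:
--             act = any(model_t0[u] for u, op in ops.items() if op == "activate")
--             inact = any(model_t0[u] for u, op in ops.items() if op == "inactivate")
--             model_t1[node] = act and not inact
--     # perturbation passes; onlist applied last so it takes priority, as in the spec
--     for node in offlist:
--         if node in model_t1:
--             model_t1[node] = False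
--     for node in onlist:
--         if node in model_t1:
--             model_t1[node] = True
--     return model_t1
-- ===== Notes on version B (the rewrite author's own statement) =====
-- stated objective: alternative
-- what changed: Replaces the single per-node branch loop over model keys (which rebuilds upstream value/operation index lists and applies node_update_rules) with three differently-shaped passes: one direct any()-based pass over the incoming-edge dict for unperturbed nodes, then an offlist pass and an onlist pass (onlist last so it wins ties).
import Mathlib
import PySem

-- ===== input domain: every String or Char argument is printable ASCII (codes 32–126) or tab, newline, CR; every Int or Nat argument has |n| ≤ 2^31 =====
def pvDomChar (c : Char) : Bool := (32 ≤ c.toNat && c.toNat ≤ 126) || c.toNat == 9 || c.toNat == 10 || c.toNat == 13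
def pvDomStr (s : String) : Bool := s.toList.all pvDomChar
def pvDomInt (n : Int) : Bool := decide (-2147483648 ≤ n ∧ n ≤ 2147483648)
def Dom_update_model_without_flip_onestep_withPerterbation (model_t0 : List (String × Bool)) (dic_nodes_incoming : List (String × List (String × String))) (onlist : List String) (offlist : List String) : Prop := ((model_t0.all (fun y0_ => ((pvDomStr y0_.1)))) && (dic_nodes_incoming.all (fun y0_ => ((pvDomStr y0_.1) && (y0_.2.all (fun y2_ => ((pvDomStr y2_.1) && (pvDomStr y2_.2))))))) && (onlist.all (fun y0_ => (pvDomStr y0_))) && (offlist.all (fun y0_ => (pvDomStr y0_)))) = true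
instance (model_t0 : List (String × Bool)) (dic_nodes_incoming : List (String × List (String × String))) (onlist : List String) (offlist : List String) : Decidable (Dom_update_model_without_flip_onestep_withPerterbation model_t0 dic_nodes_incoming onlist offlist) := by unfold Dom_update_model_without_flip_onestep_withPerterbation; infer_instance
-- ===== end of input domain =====

-- B replaces A's single per-node branch loop (which rebuilds upstream value/operation lists and calls
-- node_update_rules) with three differently-shaped passes: a direct any()-based pass over the incoming-edge
-- dict for unperturbed nodes, then an offlist pass and an onlist pass (onlist applied last so it wins ties).
-- Objective: alternative decomposition (not claimed faster).

-- ===== PORT A =====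
def node_update_rules (init_cur_upstream_values : List Bool) (init_cur_operation : List String) : Bool :=
  let active_index : List Int :=
    (PySem.List.enumerate init_cur_operation).filterMap
      (fun p => if p.2 == "activate" then some p.1 else none)
  let inactive_index : List Int :=
    (PySem.List.enumerate init_cur_operation).filterMap
      (fun p => if p.2 == "inactivate" then some p.1 else none)
  let cur1 :=
    if active_index.length > 0 then
      active_index.foldl (fun c i => c || PySem.List.pyGetD init_cur_upstream_values i false) false
    else false
  let cur2 :=
    if inactive_index.length > 0 then
      inactive_index.foldl (fun c i => c || PySem.List.pyGetD init_cur_upstream_values i false) false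
    else false
  cur1 && !cur2

def update_model_without_flip_onestep_withPerterbation (model_t0 : List (String × Bool)) (dic_nodes_incoming : List (String × List (String × String))) (onlist : List String) (offlist : List String) : List (String × Bool) :=
  let m0 : PySem.Dict String Bool := PySem.Dict.ofList model_t0
  let dic : PySem.Dict String (PySem.Dict String String) :=
    PySem.Dict.ofList (dic_nodes_incoming.map (fun p => (p.1, PySem.Dict.ofList p.2)))
  let model_t1 :=
    m0.keys.foldl (fun m1 cur_node =>
      if cur_node ∈ onlist then
        m1.insert cur_node true
      else if cur_node ∈ offlist then
        m1.insert cur_node false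
      else if cur_node ∈ dic.keys then
        let ops := dic.getD cur_node PySem.Dict.empty
        -- the append loop over upstream nodes building the two parallel lists
        let pair := ops.keys.foldl
          (fun (acc : List Bool × List String) u =>
            (acc.1 ++ [m0.getD u false], acc.2 ++ [ops.getD u ""]))
          ([], [])
        m1.insert cur_node (node_update_rules pair.1 pair.2)
      else
        m1.insert cur_node (m0.getD cur_node false)) m0
  model_t1.items

-- ===== PORT B =====
def update_model_without_flip_onestep_withPerterbation_alt (model_t0 : List (String × Bool)) (dic_nodes_incoming : List (String × List (String × String))) (onlist : List String) (offlist : List String) : List (String × Bool) :=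
  let m0 : PySem.Dict String Bool := PySem.Dict.ofList model_t0
  let dic : PySem.Dict String (PySem.Dict String String) :=
    PySem.Dict.ofList (dic_nodes_incoming.map (fun p => (p.1, PySem.Dict.ofList p.2)))
  let m1 :=
    dic.items.foldl (fun m1 p =>
      if m1.contains p.1 ∧ p.1 ∉ onlist ∧ p.1 ∉ offlist then
        let act := p.2.items.any (fun q => q.2 == "activate" && m0.getD q.1 false)
        let inact := p.2.items.any (fun q => q.2 == "inactivate" && m0.getD q.1 false)
        m1.insert p.1 (act && !inact)
      else m1) m0
  let m2 := offlist.foldl (fun m node => if m.contains node then m.insert node false else m) m1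
  let m3 := onlist.foldl (fun m node => if m.contains node then m.insert node true else m) m2
  m3.items

-- ===== PRECONDITION & SPEC =====
-- Pre_ excludes exactly the inputs on which Python A raises KeyError: an unperturbed model node with an
-- incoming-edge entry whose upstream node is missing from model_t0.
def Pre_update_model_without_flip_onestep_withPerterbation (model_t0 : List (String × Bool)) (dic_nodes_incoming : List (String × List (String × String))) (onlist : List String) (offlist : List String) : Prop :=
  ∀ p ∈ dic_nodes_incoming,
    (p.1 ∈ model_t0.map Prod.fst ∧ p.1 ∉ onlist ∧ p.1 ∉ offlist) →
      ∀ q ∈ p.2, q.1 ∈ model_t0.map Prod.fst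
instance (model_t0 : List (String × Bool)) (dic_nodes_incoming : List (String × List (String × String))) (onlist : List String) (offlist : List String) : Decidable (Pre_update_model_without_flip_onestep_withPerterbation model_t0 dic_nodes_incoming onlist offlist) := by unfold Pre_update_model_without_flip_onestep_withPerterbation; infer_instance

def pvWitness_update_model_without_flip_onestep_withPerterbation : (List (String × Bool)) × (List (String × List (String × String))) × List String × List String :=
  ([("a", true), ("b", false), ("c", true)],
   [("b", [("a", "activate"), ("c", "inactivate")]), ("c", [("a", "activate")])],
   ["a"], ["c"])

def Spec_update_model_without_flip_onestep_withPerterbation (model_t0 : List (String × Bool)) (dic_nodes_incoming : List (String × List (String × String))) (onlist : List String) (offlist : List String) (out : List (String × Bool)) : Prop := out = update_model_without_flip_onestep_withPerterbation_alt model_t0 dic_nodes_incoming onlist offlist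
instance (model_t0 : List (String × Bool)) (dic_nodes_incoming : List (String × List (String × String))) (onlist : List String) (offlist : List String) (out : List (String × Bool)) : Decidable (Spec_update_model_without_flip_onestep_withPerterbation model_t0 dic_nodes_incoming onlist offlist out) := by unfold Spec_update_model_without_flip_onestep_withPerterbation; infer_instance

-- ===== CLAIM (what is proved, stated in full; the proofs are below) =====
def Claim_equal_update_model_without_flip_onestep_withPerterbation : Prop := ∀ (model_t0 : List (String × Bool)) (dic_nodes_incoming : List (String × List (String × String))) (onlist : List String) (offlist : List String), Dom_update_model_without_flip_onestep_withPerterbation model_t0 dic_nodes_incoming onlist offlist → Pre_update_model_without_flip_onestep_withPerterbation model_t0 dic_nodes_incoming onlist offlist → Spec_update_model_without_flip_onestep_withPerterbation model_t0 dic_nodes_incoming onlist offlist (update_model_without_flip_onestep_withPerterbation model_t0 dic_nodes_incoming onlist offlist)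


-- ===== LEMMAS AND PROOFS =====

-- proof-only helpers: the common per-node value both programs compute
def pvGval (M0 : PySem.Dict String Bool) (ops : PySem.Dict String String) : Bool :=
  (ops.items.any (fun q => q.2 == "activate" && M0.getD q.1 false))
    && !(ops.items.any (fun q => q.2 == "inactivate" && M0.getD q.1 false))

def pvVal (M0 : PySem.Dict String Bool) (DIC : PySem.Dict String (PySem.Dict String String))
    (onlist offlist : List String) (k : String) : Bool :=
  if k ∈ onlist then true
  else if k ∈ offlist then false
  else
    match DIC.get? k with
    | some ops => pvGval M0 ops
    | none => M0.getD k false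

-- A's per-node value in its original branch shape
def pvValA (M0 : PySem.Dict String Bool) (DIC : PySem.Dict String (PySem.Dict String String))
    (onlist offlist : List String) (k : String) : Bool :=
  if k ∈ onlist then true
  else if k ∈ offlist then false
  else if k ∈ DIC.keys then
    let ops := DIC.getD k PySem.Dict.empty
    let pair := ops.keys.foldl
      (fun (acc : List Bool × List String) u =>
        (acc.1 ++ [M0.getD u false], acc.2 ++ [ops.getD u ""]))
      ([], [])
    node_update_rules pair.1 pair.2
  else M0.getD k false

-- fold-with-or is `any`
theorem pv_foldl_or {α : Type} (l : List α) (f : α → Bool) (b : Bool) :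
    l.foldl (fun c x => c || f x) b = (b || l.any f) := by
  induction l generalizing b with
  | nil => simp
  | cons x t ih => simp [List.foldl_cons, ih, Bool.or_assoc]

-- the indexed any over enumerate+filterMap is the zip any
theorem pv_idx_any (tag : String) (os : List String) (vs : List Bool) (pre : List Bool)
    (hlen : os.length = vs.length) :
    (((PySem.List.enumerate os (pre.length : Int)).filterMap
        (fun p => if p.2 == tag then some p.1 else none)).any
      (fun i => PySem.List.pyGetD (pre ++ vs) i false))
    = (os.zip vs).any (fun p => p.1 == tag && p.2) := by
  induction os generalizing vs pre with
  | nil => simp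
  | cons o ot ih =>
    cases vs with
    | nil => simp at hlen
    | cons v vt =>
      have hlen' : ot.length = vt.length := by simpa using hlen
      have hrw : pre ++ v :: vt = (pre ++ [v]) ++ vt := by simp
      have hs : ((pre.length : Int) + 1) = ((pre ++ [v]).length : Int) := by
        simp
      rw [PySem.List.enumerate_cons, hrw, hs]
      by_cases hto : (o == tag) = true
      · simp only [List.filterMap_cons, hto, if_pos, List.any_cons, ih vt (pre ++ [v]) hlen']
        have hget : PySem.List.pyGetD ((pre ++ [v]) ++ vt) ((pre.length : Int)) false = v := by
          rw [PySem.List.pyGetD_natCast]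
          simp [List.getD]
        rw [hget]
        simp [hto]
      · simp only [List.filterMap_cons, hto]
        simp only [Bool.false_eq_true, if_false]
        rw [ih vt (pre ++ [v]) hlen']
        simp [hto]

-- node_update_rules on two parallel map-built lists
theorem pv_rules_eq (ks : List String) (f : String → Bool) (h : String → String) :
    node_update_rules (ks.map f) (ks.map h)
      = ((ks.any fun u => (h u == "activate") && f u)
          && !(ks.any fun u => (h u == "inactivate") && f u)) := by
  unfold node_update_rules
  have hguard : ∀ (l : List Int),
      (if l.length > 0 then l.foldl (fun c i => c || PySem.List.pyGetD (ks.map f) i false) false else false)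
        = l.any (fun i => PySem.List.pyGetD (ks.map f) i false) := by
    intro l
    cases l with
    | nil => simp
    | cons a t => simp [pv_foldl_or]
  simp only [hguard]
  have hz : ∀ tag, (((PySem.List.enumerate (ks.map h) ((0:Int))).filterMap
        (fun p => if p.2 == tag then some p.1 else none)).any
      (fun i => PySem.List.pyGetD (ks.map f) i false))
      = (ks.any fun u => (h u == tag) && f u) := by
    intro tag
    have := pv_idx_any tag (ks.map h) (ks.map f) [] (by simp)
    simp only [List.length_nil, Nat.cast_zero, List.nil_append] at this
    rw [this]
    rw [List.zip_map']
    simp [List.any_map, Function.comp_def]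
  rw [hz, hz]

-- keys are preserved by a fold whose step preserves them
theorem pv_keys_foldl_pres {α : Type} (step : PySem.Dict String Bool → α → PySem.Dict String Bool)
    (l : List α) (K : List String)
    (h : ∀ d' x, x ∈ l → d'.keys = K → (step d' x).keys = K) :
    ∀ d : PySem.Dict String Bool, d.keys = K → (l.foldl step d).keys = K := by
  induction l with
  | nil => intro d hd; simpa using hd
  | cons x t ih =>
    intro d hd
    simp only [List.foldl_cons]
    exact ih (fun d' y hy => h d' y (List.mem_cons_of_mem _ hy)) _ (h d x (List.mem_cons_self) hd)

-- getD after a fold of inserts with key-determined values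
theorem pv_getD_foldl_insert_fun (l : List String) (v : String → Bool)
    (d : PySem.Dict String Bool) (x : String) :
    (l.foldl (fun d k => d.insert k (v k)) d).getD x false
      = if x ∈ l then v x else d.getD x false := by
  induction l generalizing d with
  | nil => simp
  | cons k t ih =>
    simp only [List.foldl_cons, ih, PySem.Dict.getD_insert]
    by_cases hxt : x ∈ t
    · simp [hxt]
    · by_cases hxk : x = k <;> simp [hxt, hxk]

-- getD after the conditional constant-setting pass (off/on lists)
theorem pv_getD_foldl_setconst (l : List String) (c : Bool)
    (d : PySem.Dict String Bool) (x : String) :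
    (l.foldl (fun m k => if m.contains k then m.insert k c else m) d).getD x false
      = if x ∈ l ∧ d.contains x = true then c else d.getD x false := by
  induction l generalizing d with
  | nil => simp
  | cons k t ih =>
    simp only [List.foldl_cons]
    by_cases hk : d.contains k = true
    · simp only [hk, if_pos]
      rw [ih]
      have hcont : (d.insert k c).contains x = d.contains x := by
        rw [PySem.Dict.contains_insert]
        by_cases hxk : x = k
        · subst hxk; simp [hk]
        · simp [hxk]
      rw [hcont, PySem.Dict.getD_insert]
      by_cases hxk : x = k
      · subst hxk; simp [hk]
      · simp [hxk, List.mem_cons]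
    · simp only [hk, Bool.false_eq_true, if_false]
      rw [ih]
      by_cases hxt : x ∈ t
      · simp [hxt]
      · by_cases hxk : x = k
        · subst hxk; simp [hxt, hk]
        · simp [hxt, hxk]

-- get? of a literal dict is assoc-list lookup
theorem pv_get?_eq_lookup {ν : Type} (l : List (String × ν)) (x : String) :
    (PySem.Dict.mk l).get? x = List.lookup x l := by
  induction l with
  | nil => simp [PySem.Dict.get?, List.lookup]
  | cons p t ih =>
    cases p with
    | mk k v =>
      rw [PySem.Dict.get?_mk_cons, List.lookup]
      by_cases hk : k = x
      · subst hk; simp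
      · have h1 : (k == x) = false := by simp [hk]
        have h2 : (x == k) = false := by simp [Ne.symm hk]
        simp [h1, h2, ih]

theorem pv_lookup_eq_none {ν : Type} (T : List (String × ν)) (x : String)
    (h : x ∉ T.map Prod.fst) : List.lookup x T = none := by
  induction T with
  | nil => simp [List.lookup]
  | cons p t ih =>
    simp only [List.map_cons, List.mem_cons] at h
    push Not at h
    have hx : (x == p.1) = false := by simp [h.1]
    cases p with
    | mk k v =>
      rw [List.lookup]
      simp only [hx]
      exact ih h.2

-- getD after the incoming-edges pass of B
theorem pv_getD_foldl_dic (m0 : PySem.Dict String Bool) (onlist offlist : List String)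
    (L : List (String × PySem.Dict String String)) (hnd : (L.map Prod.fst).Nodup)
    (m : PySem.Dict String Bool) (x : String) :
    ((L.foldl (fun m1 p =>
        if m1.contains p.1 ∧ p.1 ∉ onlist ∧ p.1 ∉ offlist then
          m1.insert p.1 (pvGval m0 p.2)
        else m1) m).getD x false)
      = match List.lookup x L with
        | some ops =>
          if m.contains x = true ∧ x ∉ onlist ∧ x ∉ offlist then pvGval m0 ops
          else m.getD x false
        | none => m.getD x false := by
  induction L generalizing m with
  | nil => simp [List.lookup]
  | cons p T ih =>
    obtain ⟨k, ops⟩ := p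
    simp only [List.map_cons, List.nodup_cons] at hnd
    obtain ⟨hknot, hndT⟩ := hnd
    simp only [List.foldl_cons]
    rw [ih hndT]
    by_cases hxk : x = k
    · subst hxk
      have hlkT : List.lookup x T = none := pv_lookup_eq_none T x hknot
      rw [hlkT, List.lookup]
      simp only [beq_self_eq_true]
      by_cases hc : m.contains x = true ∧ x ∉ onlist ∧ x ∉ offlist
      · rw [if_pos hc, if_pos hc, PySem.Dict.getD_insert]
        simp
      · rw [if_neg hc, if_neg hc]
    · have hbk : (x == k) = false := by simp [hxk]
      rw [List.lookup]
      simp only [hbk]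
      by_cases hc : m.contains k = true ∧ k ∉ onlist ∧ k ∉ offlist
      · rw [if_pos hc]
        have hcont : (m.insert k (pvGval m0 ops)).contains x = m.contains x := by
          rw [PySem.Dict.contains_insert]
          simp [hxk]
        have hgd : (m.insert k (pvGval m0 ops)).getD x false = m.getD x false := by
          rw [PySem.Dict.getD_insert]
          simp [hxk]
        cases hl : List.lookup x T <;> simp [hcont, hgd]
      · rw [if_neg hc]

-- values produced by an insert fold come from the pairs or the start dict
theorem pv_values_foldl_insert {ν : Type} (l : List (String × ν)) :
    ∀ (d : PySem.Dict String ν), ∀ w ∈ (l.foldl (fun acc p => acc.insert p.1 p.2) d).values,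
      w ∈ d.values ∨ w ∈ l.map Prod.snd := by
  induction l with
  | nil => intro d w hw; exact Or.inl hw
  | cons p t ih =>
    intro d w hw
    rcases ih (d.insert p.1 p.2) w hw with h | h
    · rcases PySem.Dict.mem_values_insert d p.1 p.2 w h with h2 | h2
      · subst h2; exact Or.inr (by simp)
      · exact Or.inl h2
    · exact Or.inr (by simp [h])

-- every upstream dict stored in DIC (or the default) has nodup keys
theorem pv_ops_nodup (dic_nodes_incoming : List (String × List (String × String))) (k : String) :
    ((PySem.Dict.ofList (dic_nodes_incoming.map (fun p => (p.1, PySem.Dict.ofList p.2)))).getD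
        k PySem.Dict.empty).keys.Nodup := by
  cases hg : (PySem.Dict.ofList (dic_nodes_incoming.map (fun p => (p.1, PySem.Dict.ofList p.2)))).get? k with
  | none =>
    rw [PySem.Dict.getD_of_get?_eq_none _ _ hg]
    simp [PySem.Dict.keys, PySem.Dict.empty]
  | some ops =>
    rw [PySem.Dict.getD_of_get?_eq_some _ _ hg]
    have hmem : (k, ops) ∈ (PySem.Dict.ofList (dic_nodes_incoming.map (fun p => (p.1, PySem.Dict.ofList p.2)))).items :=
      PySem.Dict.mem_items_of_get?_eq_some _ hg
    have hv : ops ∈ (PySem.Dict.ofList (dic_nodes_incoming.map (fun p => (p.1, PySem.Dict.ofList p.2)))).values := by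
      simp only [PySem.Dict.values, List.mem_map]
      exact ⟨(k, ops), hmem, rfl⟩
    have := pv_values_foldl_insert (dic_nodes_incoming.map (fun p => (p.1, PySem.Dict.ofList p.2)))
      PySem.Dict.empty ops (by exact hv)
    rcases this with h | h
    · simp [PySem.Dict.values, PySem.Dict.empty] at h
    · simp only [List.map_map, List.mem_map] at h
      obtain ⟨q, _, hq⟩ := h
      rw [← hq]
      exact PySem.Dict.nodup_keys_ofList _

-- A's result as a map over the model keys
theorem pv_A_items (model_t0 : List (String × Bool)) (dic_nodes_incoming : List (String × List (String × String)))
    (onlist offlist : List String) :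
    update_model_without_flip_onestep_withPerterbation model_t0 dic_nodes_incoming onlist offlist
      = (PySem.Dict.ofList model_t0).keys.map (fun k => (k,
            pvVal (PySem.Dict.ofList model_t0)
              (PySem.Dict.ofList (dic_nodes_incoming.map (fun p => (p.1, PySem.Dict.ofList p.2))))
              onlist offlist k)) := by
  simp only [update_model_without_flip_onestep_withPerterbation]
  set M0 : PySem.Dict String Bool := PySem.Dict.ofList model_t0 with hM0
  set DIC : PySem.Dict String (PySem.Dict String String) :=
    PySem.Dict.ofList (dic_nodes_incoming.map (fun p => (p.1, PySem.Dict.ofList p.2))) with hDIC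
  have hcongr : M0.keys.foldl (fun m1 cur_node =>
      if cur_node ∈ onlist then m1.insert cur_node true
      else if cur_node ∈ offlist then m1.insert cur_node false
      else if cur_node ∈ DIC.keys then
        m1.insert cur_node (node_update_rules
          ((DIC.getD cur_node PySem.Dict.empty).keys.foldl
            (fun (acc : List Bool × List String) u =>
              (acc.1 ++ [M0.getD u false], acc.2 ++ [(DIC.getD cur_node PySem.Dict.empty).getD u ""]))
            ([], [])).1
          ((DIC.getD cur_node PySem.Dict.empty).keys.foldl
            (fun (acc : List Bool × List String) u =>
              (acc.1 ++ [M0.getD u false], acc.2 ++ [(DIC.getD cur_node PySem.Dict.empty).getD u ""]))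
            ([], [])).2)
      else m1.insert cur_node (M0.getD cur_node false)) M0
      = M0.keys.foldl (fun m1 k => m1.insert k (pvValA M0 DIC onlist offlist k)) M0 := by
    apply PySem.List.foldl_congr_mem
    intro acc x _
    unfold pvValA
    split_ifs <;> rfl
  rw [hcongr]
  have hkeys : (M0.keys.foldl (fun m1 k => m1.insert k (pvValA M0 DIC onlist offlist k)) M0).keys = M0.keys := by
    apply pv_keys_foldl_pres _ _ _ _ _ rfl
    intro d' x hx hd'
    have hcont : d'.contains x = true := by
      rw [PySem.Dict.contains_eq_decide_mem_keys, hd']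
      simpa using hx
    rw [PySem.Dict.keys_insert_of_contains _ _ hcont, hd']
  have hnd : (M0.keys.foldl (fun m1 k => m1.insert k (pvValA M0 DIC onlist offlist k)) M0).keys.Nodup := by
    rw [hkeys]; exact PySem.Dict.nodup_keys_ofList _
  rw [PySem.Dict.items_eq_map_keys _ hnd false, hkeys]
  apply List.map_eq_map_iff.mpr
  intro k hk
  rw [pv_getD_foldl_insert_fun]
  simp only [hk, if_pos]
  congr 1
  -- pvValA = pvVal at k
  unfold pvValA pvVal
  by_cases hon : k ∈ onlist
  · simp [hon]
  · by_cases hoff : k ∈ offlist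
    · simp [hon, hoff]
    · simp only [hon, hoff, if_false]
      by_cases hdic : k ∈ DIC.keys
      · have hcont : DIC.contains k = true := by
          rw [PySem.Dict.contains_eq_decide_mem_keys]; simpa using hdic
        rw [PySem.Dict.contains_eq_isSome_get?] at hcont
        obtain ⟨ops, hops⟩ := Option.isSome_iff_exists.mp hcont
        have hgetD : DIC.getD k PySem.Dict.empty = ops := PySem.Dict.getD_of_get?_eq_some _ _ hops
        simp only [hdic, if_pos, hops, hgetD]
        -- the pair fold builds two parallel maps
        rw [PySem.List.foldl_prod_mk (f := fun a u => a ++ [M0.getD u false])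
          (g := fun a u => a ++ [ops.getD u ""])]
        simp only [PySem.List.foldl_append_singleton_eq_map, List.nil_append]
        rw [pv_rules_eq]
        have hndops : ops.keys.Nodup := by
          rw [← hgetD]; exact pv_ops_nodup dic_nodes_incoming k
        unfold pvGval
        rw [PySem.Dict.items_eq_map_keys ops hndops ""]
        simp [List.any_map, Function.comp_def]
      · have hcont : DIC.contains k = false := by
          rw [PySem.Dict.contains_eq_decide_mem_keys]; simpa using hdic
        have hget : DIC.get? k = none := by
          rw [PySem.Dict.contains_eq_isSome_get?] at hcont
          simpa [Option.isSome_eq_false_iff, Option.isNone_iff_eq_none] using hcont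
        simp [hdic, hget]

-- B's result as the same map over the model keys
theorem pv_B_items (model_t0 : List (String × Bool)) (dic_nodes_incoming : List (String × List (String × String)))
    (onlist offlist : List String) :
    update_model_without_flip_onestep_withPerterbation_alt model_t0 dic_nodes_incoming onlist offlist
      = (PySem.Dict.ofList model_t0).keys.map (fun k => (k,
            pvVal (PySem.Dict.ofList model_t0)
              (PySem.Dict.ofList (dic_nodes_incoming.map (fun p => (p.1, PySem.Dict.ofList p.2))))
              onlist offlist k)) := by
  simp only [update_model_without_flip_onestep_withPerterbation_alt]
  set M0 : PySem.Dict String Bool := PySem.Dict.ofList model_t0 with hM0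
  set DIC : PySem.Dict String (PySem.Dict String String) :=
    PySem.Dict.ofList (dic_nodes_incoming.map (fun p => (p.1, PySem.Dict.ofList p.2))) with hDIC
  set m1 : PySem.Dict String Bool := DIC.items.foldl (fun m1 p =>
      if m1.contains p.1 ∧ p.1 ∉ onlist ∧ p.1 ∉ offlist then
        m1.insert p.1
          ((p.2.items.any (fun q => q.2 == "activate" && M0.getD q.1 false))
            && !(p.2.items.any (fun q => q.2 == "inactivate" && M0.getD q.1 false)))
      else m1) M0 with hm1
  set m2 : PySem.Dict String Bool :=
    offlist.foldl (fun m node => if m.contains node then m.insert node false else m) m1 with hm2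
  set m3 : PySem.Dict String Bool :=
    onlist.foldl (fun m node => if m.contains node then m.insert node true else m) m2 with hm3
  have hkeys1 : m1.keys = M0.keys := by
    rw [hm1]
    apply pv_keys_foldl_pres _ _ _ _ _ rfl
    intro d' x _ hd'
    by_cases hc : d'.contains x.1 = true ∧ x.1 ∉ onlist ∧ x.1 ∉ offlist
    · rw [if_pos hc, PySem.Dict.keys_insert_of_contains _ _ hc.1, hd']
    · rw [if_neg hc]; exact hd'
  have hkeys2 : m2.keys = M0.keys := by
    rw [hm2]
    apply pv_keys_foldl_pres _ _ _ _ _ hkeys1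
    intro d' x _ hd'
    by_cases hc : d'.contains x = true
    · rw [if_pos hc, PySem.Dict.keys_insert_of_contains _ _ hc, hd']
    · rw [if_neg (by simp [hc])]; exact hd'
  have hkeys3 : m3.keys = M0.keys := by
    rw [hm3]
    apply pv_keys_foldl_pres _ _ _ _ _ hkeys2
    intro d' x _ hd'
    by_cases hc : d'.contains x = true
    · rw [if_pos hc, PySem.Dict.keys_insert_of_contains _ _ hc, hd']
    · rw [if_neg (by simp [hc])]; exact hd'
  have hnd3 : m3.keys.Nodup := by rw [hkeys3]; exact PySem.Dict.nodup_keys_ofList _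
  rw [PySem.Dict.items_eq_map_keys _ hnd3 false, hkeys3]
  apply List.map_eq_map_iff.mpr
  intro k hk
  have hckM0 : M0.contains k = true := by
    rw [PySem.Dict.contains_eq_decide_mem_keys]; simpa using hk
  have hck1 : m1.contains k = true := by
    rw [PySem.Dict.contains_eq_decide_mem_keys, hkeys1]; simpa using hk
  have hck2 : m2.contains k = true := by
    rw [PySem.Dict.contains_eq_decide_mem_keys, hkeys2]; simpa using hk
  congr 1
  rw [hm3, pv_getD_foldl_setconst, hck2]
  rw [hm2, pv_getD_foldl_setconst, hck1]
  have hnditems : (DIC.items.map Prod.fst).Nodup := by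
    have := PySem.Dict.nodup_keys_ofList (dic_nodes_incoming.map (fun p => (p.1, PySem.Dict.ofList p.2)))
    simpa [PySem.Dict.keys] using this
  have hm1val := pv_getD_foldl_dic M0 onlist offlist DIC.items hnditems M0 k
  have hm1val' : m1.getD k false
      = match List.lookup k DIC.items with
        | some ops =>
          if M0.contains k = true ∧ k ∉ onlist ∧ k ∉ offlist then pvGval M0 ops
          else M0.getD k false
        | none => M0.getD k false := by
    rw [hm1]
    exact hm1val
  have hlk : List.lookup k DIC.items = DIC.get? k := (pv_get?_eq_lookup DIC.items k).symm
  rw [hlk] at hm1val'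
  unfold pvVal
  by_cases hon : k ∈ onlist
  · simp [hon]
  · by_cases hoff : k ∈ offlist
    · simp [hon, hoff]
    · simp only [hon, hoff, if_false, false_and]
      rw [hm1val']
      cases hg : DIC.get? k with
      | none => rfl
      | some ops =>
        simp [hckM0, hon, hoff]

-- ===== VERDICT (by name: the statement is the Claim_ definition above) =====
theorem update_model_without_flip_onestep_withPerterbation_spec : Claim_equal_update_model_without_flip_onestep_withPerterbation := by
  intro model_t0 dic_nodes_incoming onlist offlist _hDom _hPre
  unfold Spec_update_model_without_flip_onestep_withPerterbation
  rw [pv_A_items, pv_B_items]
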